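-- pv_equiv track=rewrite | github.com/sammasam/bioinfo_scripts | contig_taxonomy_from_homolgy/gi_to_taxid_1.py | update_lineage
-- ===== SOURCE A (Python) =====
-- def update_lineage (taxid, parent_taxid, rank, lineage, taxonomyDict):
--     rank_index = {'species':0,'genus':1,'family':2,'order':3,'class':4,'phylum':5,'superkingdom':6}
--     if rank in rank_index:
--         index = rank_index[rank]
--         lineage[index] = taxid
--     if parent_taxid == 1:
--         return(lineage)
--     else:
--         (xid, rank) = taxonomyDict[parent_taxid]
--         lineage = update_lineage (parent_taxid, xid,rank, lineage, taxonomyDict)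
--     return(lineage)
-- ===== SOURCE B (Python) =====
-- def update_lineage(taxid, parent_taxid, rank, lineage, taxonomyDict):
--     ranks = ('species', 'genus', 'family', 'order', 'class', 'phylum', 'superkingdom')
--     # phase 1: walk the parent-pointer chain once, collecting the visited nodes
--     chain = [(taxid, rank)]
--     while parent_taxid != 1:
--         (xid, prank) = taxonomyDict[parent_taxid]
--         chain.append((parent_taxid, prank))
--         parent_taxid = xid
--     # phase 2: assign lineage slots child-to-ancestor (later nodes overwrite)
--     for (tid, r) in chain:
--         if r in ranks:
--             lineage[ranks.index(r)] = tid
--     return lineage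
-- ===== Notes on version B (the rewrite author's own statement) =====
-- stated objective: alternative
-- what changed: B replaces A's assign-as-you-recurse walk by two separate phases: an iterative loop that first collects the visited parent chain into a list, then a fold over that list that assigns lineage slots via a rank tuple and index lookup.
import Mathlib
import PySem

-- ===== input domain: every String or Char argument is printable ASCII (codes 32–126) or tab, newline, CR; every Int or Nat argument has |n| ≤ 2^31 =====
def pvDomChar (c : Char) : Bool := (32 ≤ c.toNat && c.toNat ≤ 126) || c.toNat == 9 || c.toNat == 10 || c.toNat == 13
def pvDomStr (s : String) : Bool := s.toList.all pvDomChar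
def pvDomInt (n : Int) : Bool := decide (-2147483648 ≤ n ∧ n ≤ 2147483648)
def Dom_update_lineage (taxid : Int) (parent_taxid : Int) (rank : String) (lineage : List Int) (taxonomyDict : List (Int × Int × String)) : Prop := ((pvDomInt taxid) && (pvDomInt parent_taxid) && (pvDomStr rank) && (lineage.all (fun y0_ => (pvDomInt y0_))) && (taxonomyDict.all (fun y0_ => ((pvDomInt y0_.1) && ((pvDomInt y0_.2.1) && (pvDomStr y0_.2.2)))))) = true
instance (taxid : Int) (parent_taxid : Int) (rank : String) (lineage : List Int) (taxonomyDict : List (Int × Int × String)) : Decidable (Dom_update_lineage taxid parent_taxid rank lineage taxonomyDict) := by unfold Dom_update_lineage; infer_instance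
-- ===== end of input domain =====

-- B replaces A's record-as-you-recurse walk by two phases (collect the parent chain, then fold
-- the assignments over it); objective: alternative decomposition, same cost. Both Pythons mutate
-- `lineage` in place identically on Pre_; the theorems are about the return value.


-- ===== PORT A =====
-- Python dict lookup on the assoc list (first match), as in `taxonomyDict[parent_taxid]`
def pvLookup (d : List (Int × Int × String)) (k : Int) : Option (Int × String) :=
  (d.find? (fun p => p.1 == k)).map (·.2)

-- A's rank_index dict; values are the literal nonnegative indices 0..6
def pvRankIndex : PySem.Dict String Int :=
  PySem.Dict.mk [("species",0),("genus",1),("family",2),("order",3),("class",4),("phylum",5),("superkingdom",6)]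

-- A's recursion, with fuel making it total; fuel taxonomyDict.length + 1 suffices whenever the
-- Python returns (a terminating chain visits pairwise distinct keys); the fuel-out/missing-key
-- branch is Python's KeyError / infinite recursion, excluded by Pre_.
def pvGoA (fuel : Nat) (taxid parent_taxid : Int) (rank : String) (lineage : List Int)
    (taxonomyDict : List (Int × Int × String)) : List Int :=
  let lin := match pvRankIndex.get? rank with
    | some i => lineage.set i.toNat taxid   -- indices are literals 0..6, so toNat is exact
    | none => lineage
  if parent_taxid = 1 then lin
  else match fuel, pvLookup taxonomyDict parent_taxid with
    | f+1, some (xid, r) => pvGoA f parent_taxid xid r lin taxonomyDict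
    | _, _ => lin

def update_lineage (taxid : Int) (parent_taxid : Int) (rank : String) (lineage : List Int) (taxonomyDict : List (Int × Int × String)) : List Int :=
  pvGoA (taxonomyDict.length + 1) taxid parent_taxid rank lineage taxonomyDict

-- ===== PORT B =====
-- B's ranks tuple
def pvRanks : List String := ["species","genus","family","order","class","phylum","superkingdom"]

-- phase 1 of B: the while loop collecting the visited chain (fuel = totality guard, as above)
def pvChain (fuel : Nat) (taxid parent_taxid : Int) (rank : String)
    (taxonomyDict : List (Int × Int × String)) : Option (List (Int × String)) :=
  if parent_taxid = 1 then some [(taxid, rank)]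
  else match fuel, pvLookup taxonomyDict parent_taxid with
    | f+1, some (xid, prank) =>
        (pvChain f parent_taxid xid prank taxonomyDict).map ((taxid, rank) :: ·)
    | _, _ => none

-- phase 2 of B: the for loop assigning lineage slots
def pvApply (chain : List (Int × String)) (lineage : List Int) : List Int :=
  chain.foldl (fun lin p =>
    match PySem.List.index? pvRanks p.2 with
    | some i => lin.set i p.1
    | none => lin) lineage

def update_lineage_alt (taxid : Int) (parent_taxid : Int) (rank : String) (lineage : List Int) (taxonomyDict : List (Int × Int × String)) : List Int :=
  match pvChain (taxonomyDict.length + 1) taxid parent_taxid rank taxonomyDict with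
  | some chain => pvApply chain lineage
  | none => lineage

-- ===== PRECONDITION & SPEC =====
-- Pre_ is a condition on the INPUT's parent-pointer graph, not on either algorithm's output:
-- the node parent_taxid must REACH the root 1 (every key on the way present, no cycle), and every
-- recognized rank on that path — including the starting rank — must have its slot inside lineage.
-- It excludes exactly the inputs where Python A raises (KeyError for a missing key, IndexError for
-- an out-of-range slot) or recurses forever (a cycle). Reachability in a finite pointer graph is
-- decided, as always, by a walk bounded by the number of keys; pvPreWalk is that bounded walk —
-- it inspects only the dict's pointer structure and never computes a lineage value.
def pvRankOk (r : String) (n : Nat) : Bool :=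
  match pvRankIndex.get? r with
  | some i => i.toNat < n
  | none => true

def pvPreWalk (fuel : Nat) (parent_taxid : Int) (taxonomyDict : List (Int × Int × String)) (n : Nat) : Bool :=
  if parent_taxid = 1 then true
  else match fuel, pvLookup taxonomyDict parent_taxid with
    | f+1, some (xid, r) => pvRankOk r n && pvPreWalk f xid taxonomyDict n
    | _, _ => false

def Pre_update_lineage (taxid : Int) (parent_taxid : Int) (rank : String) (lineage : List Int) (taxonomyDict : List (Int × Int × String)) : Prop :=
  pvRankOk rank lineage.length = true ∧
  pvPreWalk (taxonomyDict.length + 1) parent_taxid taxonomyDict lineage.length = true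

instance (taxid : Int) (parent_taxid : Int) (rank : String) (lineage : List Int) (taxonomyDict : List (Int × Int × String)) : Decidable (Pre_update_lineage taxid parent_taxid rank lineage taxonomyDict) := by unfold Pre_update_lineage; infer_instance

def pvWitness_update_lineage : Int × Int × String × List Int × (List (Int × Int × String)) :=
  (9, 5, "species", [0,0,0,0,0,0,0], [(5, 1, "genus")])

def Spec_update_lineage (taxid : Int) (parent_taxid : Int) (rank : String) (lineage : List Int) (taxonomyDict : List (Int × Int × String)) (out : List Int) : Prop := out = update_lineage_alt taxid parent_taxid rank lineage taxonomyDict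
instance (taxid : Int) (parent_taxid : Int) (rank : String) (lineage : List Int) (taxonomyDict : List (Int × Int × String)) (out : List Int) : Decidable (Spec_update_lineage taxid parent_taxid rank lineage taxonomyDict out) := by unfold Spec_update_lineage; infer_instance

-- ===== CLAIM (what is proved, stated in full; the proofs are below) =====
def Claim_equal_update_lineage : Prop := ∀ (taxid : Int) (parent_taxid : Int) (rank : String) (lineage : List Int) (taxonomyDict : List (Int × Int × String)), Dom_update_lineage taxid parent_taxid rank lineage taxonomyDict → Pre_update_lineage taxid parent_taxid rank lineage taxonomyDict → Spec_update_lineage taxid parent_taxid rank lineage taxonomyDict (update_lineage taxid parent_taxid rank lineage taxonomyDict)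

-- ===== LEMMAS AND PROOFS =====

-- A's dict lookup and B's tuple-index lookup agree on every string
theorem rankIndex_eq_index (r : String) :
    (pvRankIndex.get? r).map Int.toNat = PySem.List.index? pvRanks r := by
  by_cases h0 : "species" = r
  · subst h0; decide
  by_cases h1 : "genus" = r
  · subst h1; decide
  by_cases h2 : "family" = r
  · subst h2; decide
  by_cases h3 : "order" = r
  · subst h3; decide
  by_cases h4 : "class" = r
  · subst h4; decide
  by_cases h5 : "phylum" = r
  · subst h5; decide
  by_cases h6 : "superkingdom" = r
  · subst h6; decide
  simp [pvRankIndex, pvRanks, PySem.Dict.get?, List.idxOf?,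
    List.findIdx?_cons, h0, h1, h2, h3, h4, h5, h6]

-- if pvPreWalk succeeds, the chain collection succeeds with the same fuel
theorem chain_of_preWalk (fuel : Nat) (taxid parent_taxid : Int) (rank : String)
    (d : List (Int × Int × String)) (n : Nat)
    (h : pvPreWalk fuel parent_taxid d n = true) :
    ∃ c, pvChain fuel taxid parent_taxid rank d = some c := by
  induction fuel generalizing taxid parent_taxid rank with
  | zero =>
    unfold pvPreWalk at h
    split at h
    · rename_i h1
      exact ⟨[(taxid, rank)], by unfold pvChain; rw [if_pos h1]⟩
    · cases hl : pvLookup d parent_taxid <;> rw [hl] at h <;> simp at h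
  | succ f ih =>
    unfold pvPreWalk at h
    split at h
    · rename_i h1
      exact ⟨[(taxid, rank)], by unfold pvChain; rw [if_pos h1]⟩
    · rename_i hne
      cases hl : pvLookup d parent_taxid with
      | none => rw [hl] at h; simp at h
      | some p =>
        obtain ⟨xid, r⟩ := p
        rw [hl] at h
        simp only [Bool.and_eq_true] at h
        obtain ⟨c, hc⟩ := ih parent_taxid xid r h.2
        exact ⟨(taxid, rank) :: c, by unfold pvChain; rw [if_neg hne]; simp [hl, hc]⟩

-- main lemma: whenever the chain collection succeeds, A's walk equals B's two phases
theorem goA_eq_apply (fuel : Nat) (taxid parent_taxid : Int) (rank : String)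
    (lineage : List Int) (d : List (Int × Int × String)) (c : List (Int × String))
    (h : pvChain fuel taxid parent_taxid rank d = some c) :
    pvGoA fuel taxid parent_taxid rank lineage d = pvApply c lineage := by
  induction fuel generalizing taxid parent_taxid rank lineage c with
  | zero =>
    unfold pvChain at h
    unfold pvGoA
    split at h
    · rename_i h1
      cases h
      simp only [if_pos h1, pvApply, List.foldl]
      rw [← rankIndex_eq_index rank]
      cases pvRankIndex.get? rank <;> simp
    · cases hl : pvLookup d parent_taxid <;> rw [hl] at h <;> simp at h
  | succ f ih =>
    unfold pvChain at h
    unfold pvGoA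
    split at h
    · rename_i h1
      cases h
      simp only [if_pos h1, pvApply, List.foldl]
      rw [← rankIndex_eq_index rank]
      cases pvRankIndex.get? rank <;> simp
    · rename_i hne
      simp only [if_neg hne]
      cases hl : pvLookup d parent_taxid with
      | none => rw [hl] at h; simp at h
      | some p =>
        obtain ⟨xid, r⟩ := p
        rw [hl] at h
        simp only [Option.map_eq_some_iff] at h
        obtain ⟨c2, hc2, hcc⟩ := h
        subst hcc
        show pvGoA f parent_taxid xid r
            (match pvRankIndex.get? rank with
             | some i => lineage.set i.toNat taxid
             | none => lineage) d = pvApply ((taxid, rank) :: c2) lineage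
        rw [ih parent_taxid xid r _ c2 hc2]
        simp only [pvApply, List.foldl]
        rw [← rankIndex_eq_index rank]
        cases pvRankIndex.get? rank <;> simp

-- ===== VERDICT (by name: the statement is the Claim_ definition above) =====
theorem update_lineage_spec : Claim_equal_update_lineage := by
  intro taxid parent_taxid rank lineage d _ hpre
  unfold Spec_update_lineage update_lineage update_lineage_alt
  obtain ⟨c, hc⟩ := chain_of_preWalk (d.length + 1) taxid parent_taxid rank d lineage.length hpre.2
  rw [hc, goA_eq_apply _ _ _ _ _ _ _ hc]
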